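-- pv_equiv track=rewrite | github.com/iamevn/advent-of-code-solutions | 2017/09/09.py | filtergarbage
-- ===== SOURCE A (Python) =====
-- def filtergarbage(stream):
--     output = ""
--     escaped = False
--     commented = False
--     cancelled = 0
--     for c in stream:
--         if escaped:
--             escaped = False
--         elif not commented:
--             if c == '<':
--                 commented = True
--             else:
--                 output += c
--         elif commented:
--             if escaped:
--                 pass
--             elif c == '>':
--                 commented = False
--             elif c == '!':
--                 escaped = True
--             else:
--                 cancelled += 1
--     return (output, cancelled)
-- ===== SOURCE B (Python) =====
-- def filtergarbage(stream):
--     out = []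
--     cancelled = 0
--     i = 0
--     n = len(stream)
--     while i < n:
--         c = stream[i]
--         if c == '<':
--             i += 1
--             while i < n:
--                 g = stream[i]
--                 if g == '>':
--                     i += 1
--                     break
--                 elif g == '!':
--                     i += 2
--                 else:
--                     cancelled += 1
--                     i += 1
--         else:
--             out.append(c)
--             i += 1
--     return (''.join(out), cancelled)
-- ===== Notes on version B (the rewrite author's own statement) =====
-- stated objective: alternative
-- what changed: A's flag-based flat state machine (escaped/commented booleans over a single for-loop) is replaced by an index-based scan with a nested inner loop that consumes a whole garbage section ('!' skips two positions), collecting output in a list joined at the end.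
import Mathlib
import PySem

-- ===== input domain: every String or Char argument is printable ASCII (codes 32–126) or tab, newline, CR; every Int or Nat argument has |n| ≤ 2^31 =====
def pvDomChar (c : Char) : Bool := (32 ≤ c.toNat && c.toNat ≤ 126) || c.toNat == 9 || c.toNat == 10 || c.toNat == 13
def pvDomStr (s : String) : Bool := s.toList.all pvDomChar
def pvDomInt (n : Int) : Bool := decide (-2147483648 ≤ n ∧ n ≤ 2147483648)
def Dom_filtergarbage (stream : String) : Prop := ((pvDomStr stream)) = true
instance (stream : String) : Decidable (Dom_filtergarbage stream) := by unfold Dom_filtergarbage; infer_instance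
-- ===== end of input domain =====

-- B replaces A's flag-based flat state machine by an index scan with a nested garbage-consuming loop.
-- ===== PORT A =====
def pvStepA (s : List Char × Bool × Bool × Int) (c : Char) : List Char × Bool × Bool × Int :=
  let (output, escaped, commented, cancelled) := s
  if escaped then (output, false, commented, cancelled)
  else if !commented then
    (if c = '<' then (output, escaped, true, cancelled)
     else (output ++ [c], escaped, commented, cancelled))
  else
    (if c = '>' then (output, escaped, false, cancelled)
     else if c = '!' then (output, true, commented, cancelled)
     else (output, escaped, commented, cancelled + 1))

def filtergarbage (stream : String) : String × Int :=
  let s := stream.toList.foldl pvStepA ([], false, false, 0)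
  (String.mk s.1, s.2.2.2)

-- ===== PORT B =====
-- outer scan / inner garbage loop of Source B, as mutual structural recursion over the char list
mutual
def pvOuterB : List Char → List Char × Int
  | [] => ([], 0)
  | c :: rest =>
    if c = '<' then pvGarbB rest
    else
      let r := pvOuterB rest
      (c :: r.1, r.2)
def pvGarbB : List Char → List Char × Int
  | [] => ([], 0)
  | g :: rest =>
    if g = '>' then pvOuterB rest
    else if g = '!' then
      match rest with
      | [] => ([], 0)
      | _ :: rest' => pvGarbB rest'
    else
      let r := pvGarbB rest
      (r.1, r.2 + 1)
end

def filtergarbage_alt (stream : String) : String × Int :=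
  let r := pvOuterB stream.toList
  (String.mk r.1, r.2)

-- ===== PRECONDITION & SPEC =====
def Spec_filtergarbage (stream : String) (out : String × Int) : Prop := out = filtergarbage_alt stream
instance (stream : String) (out : String × Int) : Decidable (Spec_filtergarbage stream out) := by unfold Spec_filtergarbage; infer_instance

-- ===== CLAIM (what is proved, stated in full; the proofs are below) =====
def Claim_equal_filtergarbage : Prop := ∀ (stream : String), Dom_filtergarbage stream → Spec_filtergarbage stream (filtergarbage stream)

-- ===== LEMMAS AND PROOFS =====
-- Joint invariant: starting A's fold in the non-commented (resp. commented) state with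
-- accumulated output/cancelled equals B's outer (resp. garbage) scan, appended to the accumulator.
theorem pvInvariant : ∀ (n : Nat) (l : List Char), l.length ≤ n → ∀ (out : List Char) (can : Int),
    ((List.foldl pvStepA (out, false, false, can) l).1 = out ++ (pvOuterB l).1 ∧
     (List.foldl pvStepA (out, false, false, can) l).2.2.2 = can + (pvOuterB l).2) ∧
    ((List.foldl pvStepA (out, false, true, can) l).1 = out ++ (pvGarbB l).1 ∧
     (List.foldl pvStepA (out, false, true, can) l).2.2.2 = can + (pvGarbB l).2) := by
  intro n
  induction n with
  | zero =>
    intro l hl out can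
    have : l = [] := List.eq_nil_of_length_eq_zero (Nat.le_zero.mp hl)
    subst this
    simp [pvOuterB, pvGarbB]
  | succ n ih =>
    intro l hl out can
    match l with
    | [] => simp [pvOuterB, pvGarbB]
    | c :: rest =>
      have hr : rest.length ≤ n := Nat.le_of_succ_le_succ hl
      constructor
      · -- outer state
        by_cases hc : c = '<'
        · subst hc
          have := (ih rest hr out can).2
          simp [pvStepA, pvOuterB, this.1, this.2]
        · have := (ih rest hr (out ++ [c]) can).1
          simp [pvStepA, pvOuterB, hc, this.1, this.2]
      · -- garbage state
        by_cases hgt : c = '>'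
        · subst hgt
          have := (ih rest hr out can).1
          rw [pvGarbB.eq_def]
          simp [pvStepA, this.1, this.2]
        · by_cases hex : c = '!'
          · subst hex
            -- A: next char consumed by the escaped state; B: skip two
            match rest with
            | [] => simp [pvStepA, pvGarbB]
            | x :: rest' =>
              have hr' : rest'.length ≤ n := Nat.le_of_succ_le (Nat.le_of_succ_le_succ hl)
              have := (ih rest' hr' out can).2
              simp [pvStepA, pvGarbB, this.1, this.2]
          · have := (ih rest hr out (can + 1)).2
            rw [pvGarbB.eq_def]
            simp [pvStepA, hgt, hex, this.1, this.2]
            omega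

-- ===== VERDICT (by name: the statement is the Claim_ definition above) =====
theorem filtergarbage_spec : Claim_equal_filtergarbage := by
  intro stream _
  unfold Spec_filtergarbage filtergarbage filtergarbage_alt
  have h := ((pvInvariant stream.toList.length stream.toList le_rfl [] 0).1)
  simp [h.1, h.2]
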